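-- pv_equiv track=rewrite | github.com/razi24k/python | backendbaz/val-that-r-key.py | values_that_are_keys
-- ===== SOURCE A (Python) =====
-- def values_that_are_keys(word1):
--     result_list = []
--     keys = list(word1.keys())
--     values = list(word1.values())
--     for i in keys:
--         if i in values:
--             result_list.append(i)
--     return list(set(result_list))
-- ===== SOURCE B (Python) =====
-- def values_that_are_keys(word1):
--     hits = dict.fromkeys(word1, False)
--     for v in word1.values():
--         if v in hits:
--             hits[v] = True
--     return list({k for k, hit in hits.items() if hit})
-- ===== Notes on version B (the rewrite author's own statement) =====
-- stated objective: faster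
-- what changed: Replaces A's per-key linear scan of the values list (append to a result list, dedup at the end) with a value-driven marking pass: a dict keyed by the deduplicated keys is built once, one pass over the values marks the keys that occur, and the marked keys are collected.
import Mathlib
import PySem

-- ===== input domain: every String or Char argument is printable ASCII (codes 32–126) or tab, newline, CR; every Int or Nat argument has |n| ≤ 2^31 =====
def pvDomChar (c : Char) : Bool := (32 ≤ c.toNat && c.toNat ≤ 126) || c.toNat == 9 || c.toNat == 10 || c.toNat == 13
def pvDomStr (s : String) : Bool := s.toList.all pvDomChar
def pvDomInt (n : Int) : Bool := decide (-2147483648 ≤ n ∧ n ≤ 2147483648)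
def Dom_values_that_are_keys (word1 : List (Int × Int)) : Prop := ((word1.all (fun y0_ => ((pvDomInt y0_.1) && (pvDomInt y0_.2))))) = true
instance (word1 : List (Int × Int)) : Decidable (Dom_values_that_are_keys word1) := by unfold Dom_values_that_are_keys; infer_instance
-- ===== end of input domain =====

-- B replaces A's per-key linear scan of the values list with a value-driven marking pass over
-- a dict keyed by the (deduplicated) keys — objective: faster (the inner scan disappears).


-- ===== PORT A =====
-- literal transliteration of A: collect the keys that occur in the values list, then dedup via set()
def values_that_are_keys (word1 : List (Int × Int)) : List Int :=
  let keys := word1.map (·.1)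
  let values := word1.map (·.2)
  let result_list := keys.foldl (fun acc i => if values.contains i then acc ++ [i] else acc) ([] : List Int)
  PySem.Set.ofList result_list

-- ===== PORT B =====
-- literal transliteration of B: hits = dict.fromkeys(word1, False); one pass over the values marks
-- each value that is a key; the marked keys are collected into a set and listed
def values_that_are_keys_alt (word1 : List (Int × Int)) : List Int :=
  let hits : PySem.Dict Int Bool :=
    (word1.map (·.1)).foldl (fun d k => d.insert k false) PySem.Dict.empty
  let hits := (word1.map (·.2)).foldl
    (fun d v => if d.contains v then d.insert v true else d) hits
  PySem.Set.ofList ((hits.items.filter (·.2)).map (·.1))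

-- ===== PRECONDITION & SPEC =====
def Spec_values_that_are_keys (word1 : List (Int × Int)) (out : List Int) : Prop := out = values_that_are_keys_alt word1
instance (word1 : List (Int × Int)) (out : List Int) : Decidable (Spec_values_that_are_keys word1 out) := by unfold Spec_values_that_are_keys; infer_instance

-- ===== CLAIM (what is proved, stated in full; the proofs are below) =====
def Claim_equal_values_that_are_keys : Prop := ∀ (word1 : List (Int × Int)), Dom_values_that_are_keys word1 → Spec_values_that_are_keys word1 (values_that_are_keys word1)

-- ===== LEMMAS AND PROOFS =====

-- filtering commutes with removing one element
theorem discard_filter (s : List Int) (x : Int) (p : Int → Bool) :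
    (PySem.Set.discard s x).filter p = PySem.Set.discard (s.filter p) x := by
  simp [PySem.Set.discard, List.filter_filter]; congr 1; ext y; rw [Bool.and_comm]

-- set(filter(p, xs)) = filter(p, set(xs)) as insertion-ordered distinct lists
theorem ofList_filter (p : Int → Bool) (xs : List Int) :
    PySem.Set.ofList (xs.filter p) = (PySem.Set.ofList xs).filter p := by
  induction xs with
  | nil => rfl
  | cons x xs ih =>
    by_cases hp : p x
    · simp only [List.filter_cons, hp, if_pos, PySem.Set.ofList_cons, ih, discard_filter]
    · rw [List.filter_cons_of_neg (by simp [hp]), PySem.Set.ofList_cons,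
        List.filter_cons_of_neg (by simp [hp]), discard_filter, ih]
      symm
      rw [PySem.Set.discard]
      apply List.filter_eq_self.mpr
      intro a ha
      rcases List.mem_filter.mp ha with ⟨_, hpa⟩
      have : a ≠ x := by rintro rfl; exact hp hpa
      simpa using this

-- dict.fromkeys(ks, False) holds the deduplicated keys, each mapped to False
theorem fromkeys_items (ks : List Int) :
    (ks.foldl (fun d k => d.insert k false) PySem.Dict.empty)
      = PySem.Dict.mk ((PySem.Set.ofList ks).map (fun k => (k, false))) := by
  induction ks using List.reverseRecOn with
  | nil => rfl
  | append_singleton xs x ih =>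
    rw [List.foldl_append, List.foldl_cons, List.foldl_nil, ih,
      PySem.Set.ofList_append_singleton]
    apply PySem.Dict.ext
    rw [PySem.Dict.items_insert]
    by_cases hx : x ∈ PySem.Set.ofList xs
    · have hc : (PySem.Dict.mk ((PySem.Set.ofList xs).map (fun k => (k, false)))).contains x = true := by
        rw [PySem.Dict.contains_iff_mem_keys]
        simpa [PySem.Dict.keys] using hx
      rw [if_pos hc, PySem.Set.add_of_mem hx]
      show _ = List.map _ _
      rw [List.map_map]
      apply List.map_congr_left
      intro a _
      by_cases hax : a = x <;> simp [hax]
    · have hc : (PySem.Dict.mk ((PySem.Set.ofList xs).map (fun k => (k, false)))).contains x = false := by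
        rw [← Bool.not_eq_true, PySem.Dict.contains_iff_mem_keys]
        simpa [PySem.Dict.keys] using hx
      rw [if_neg (by simp [hc]), PySem.Set.add_of_not_mem hx]
      simp

-- the marking pass over the values turns each stored flag f k into f k || vs.contains k
theorem mark_fold (vs : List Int) (ks : List Int) (f : Int → Bool) :
    vs.foldl (fun d v => if d.contains v then d.insert v true else d)
        (PySem.Dict.mk (ks.map (fun k => (k, f k))))
      = PySem.Dict.mk (ks.map (fun k => (k, f k || vs.contains k))) := by
  induction vs generalizing f with
  | nil => simp
  | cons v vs ih =>
    rw [List.foldl_cons]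
    by_cases hv : v ∈ ks
    · have hc : (PySem.Dict.mk (ks.map (fun k => (k, f k)))).contains v = true := by
        rw [PySem.Dict.contains_iff_mem_keys]
        simpa [PySem.Dict.keys] using hv
      rw [if_pos hc]
      have hins : (PySem.Dict.mk (ks.map (fun k => (k, f k)))).insert v true
          = PySem.Dict.mk (ks.map (fun k => (k, (fun j => (j == v) || f j) k))) := by
        apply PySem.Dict.ext
        rw [PySem.Dict.items_insert, if_pos hc]
        show List.map _ _ = _
        rw [List.map_map]
        apply List.map_congr_left
        intro a _
        by_cases hav : a = v <;> simp [hav]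
      rw [hins, ih]
      congr 1
      apply List.map_congr_left
      intro a _
      by_cases hav : a = v
      · simp [hav]
      · simp [show (a == v) = false from by simp [hav], hav]
    · have hc : (PySem.Dict.mk (ks.map (fun k => (k, f k)))).contains v = false := by
        rw [← Bool.not_eq_true, PySem.Dict.contains_iff_mem_keys]
        simpa [PySem.Dict.keys] using hv
      rw [if_neg (by simp [hc]), ih]
      congr 1
      apply List.map_congr_left
      intro a ha
      have hav : a ≠ v := by rintro rfl; exact hv ha
      simp [hav]

-- ===== VERDICT (by name: the statement is the Claim_ definition above) =====
theorem values_that_are_keys_spec : Claim_equal_values_that_are_keys := by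
  intro word1 _
  show PySem.Set.ofList ((word1.map (·.1)).foldl
      (fun acc i => if (word1.map (·.2)).contains i then acc ++ [i] else acc) []) =
    values_that_are_keys_alt word1
  have hB : values_that_are_keys_alt word1 = PySem.Set.ofList
      (((((word1.map (·.2)).foldl (fun d v => if d.contains v then d.insert v true else d)
          ((word1.map (·.1)).foldl (fun d k => d.insert k false) PySem.Dict.empty))).items.filter
        (·.2)).map (·.1)) := rfl
  rw [hB, PySem.List.foldl_append_if_eq_filter, List.nil_append]
  rw [fromkeys_items, mark_fold]
  rw [show ((PySem.Dict.mk ((PySem.Set.ofList (word1.map (·.1))).map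
        (fun k => (k, false || (word1.map (·.2)).contains k)))).items.filter (·.2)).map (·.1)
      = (PySem.Set.ofList (word1.map (·.1))).filter (fun k => (word1.map (·.2)).contains k) from by
    show ((List.map _ _).filter _).map _ = _
    rw [List.filter_map, List.map_map]
    simp [Function.comp_def]]
  rw [ofList_filter]
  exact (PySem.Set.ofList_eq_self_of_nodup _
    (List.Nodup.filter _ (PySem.Set.nodup_ofList (word1.map (·.1))))).symm
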